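-- pv_equiv track=rewrite | github.com/mattbroussard/advent-of-code-2022 | day8.py | computeHorizVisibilityMask
-- ===== SOURCE A (Python) =====
-- def computeHorizVisibilityMask(grid, fromLeft = True):
--   width = len(grid[0])
--   height = len(grid)
--   def colRange():
--     if fromLeft:
--       return range(width)
--     else:
--       return range(width-1,-1,-1)
--
--   mask = [[False]*width for _ in range(height)]
--   for y in range(height):
--     maxSeen = -1
--     for x in colRange():
--       cell = grid[y][x]
--       mask[y][x] = cell > maxSeen
--       maxSeen = max(maxSeen, cell)
--
--   return mask
-- ===== SOURCE B (Python) =====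
-- def computeHorizVisibilityMask(grid, fromLeft=True):
--   width = len(grid[0])
--
--   def blockers(row, x):
--     # cells standing between cell x and the viewing edge
--     return row[:x] if fromLeft else row[x + 1:width]
--
--   # a cell is visible iff it is taller than the ground level (-1) and than
--   # every blocker; computed per cell directly from the definition
--   return [[row[x] > max([-1] + blockers(row, x)) for x in range(width)]
--           for row in grid]
-- ===== Notes on version B (the rewrite author's own statement) =====
-- stated objective: alternative
-- what changed: A makes one stateful sweep per row, threading a running maximum through the cells and writing a preallocated mask in place (reversing the iteration order for fromLeft=False); B has no running state at all: for each cell it independently recomputes the maximum of the blocking cells between it and the viewing edge (a row slice plus the -1 ground level) and compares, a direct per-cell brute force that trades A's O(h*w) sweep for O(h*w^2) work.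
import Mathlib
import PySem

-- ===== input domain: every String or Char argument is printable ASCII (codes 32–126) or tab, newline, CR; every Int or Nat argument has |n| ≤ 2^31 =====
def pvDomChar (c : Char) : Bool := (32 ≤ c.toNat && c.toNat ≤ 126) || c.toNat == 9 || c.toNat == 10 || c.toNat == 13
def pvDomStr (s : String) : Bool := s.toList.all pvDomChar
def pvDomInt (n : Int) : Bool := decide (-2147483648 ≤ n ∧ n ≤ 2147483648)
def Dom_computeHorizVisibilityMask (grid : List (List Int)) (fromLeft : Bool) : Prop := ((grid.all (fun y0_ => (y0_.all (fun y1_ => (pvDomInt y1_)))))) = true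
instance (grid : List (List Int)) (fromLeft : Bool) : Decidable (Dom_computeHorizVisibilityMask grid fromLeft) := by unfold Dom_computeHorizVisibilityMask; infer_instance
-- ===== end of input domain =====

-- B replaces A's stateful running-max sweep per row by a stateless per-cell brute force
-- (each cell compares against the freshly computed max of its blocking slice plus the -1 ground);
-- same results, O(h*w^2) instead of O(h*w) ("alternative", not faster).

-- ===== PORT A =====
def computeHorizVisibilityMask (grid : List (List Int)) (fromLeft : Bool) : List (List Bool) :=
  let width : Nat := ((PySem.List.pyGet? grid 0).getD []).length   -- len(grid[0]); Pre_ excludes grid = []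
  let cols : List Int :=
    if fromLeft then PySem.List.pyRange 0 (width : Int) 1
    else PySem.List.pyRange ((width : Int) - 1) (-1) (-1)
  -- for y: maxSeen := -1; for x in colRange(): mask[y][x] := grid[y][x] > maxSeen; maxSeen := max …
  -- (rows are processed independently, so the y-loop is a map over rows)
  grid.map (fun row =>
    (cols.foldl (fun (st : List Bool × Int) (x : Int) =>
        let cell := (PySem.List.pyGet? row x).getD 0               -- grid[y][x]; in range under Pre_
        (st.1.set x.toNat (decide (cell > st.2)), max st.2 cell))
      (List.replicate width false, -1)).1)

-- ===== PORT B =====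
-- blockers(row, x) = row[:x] if fromLeft else row[x+1:width]
def pvBlockers (width : Nat) (fromLeft : Bool) (row : List Int) (x : Int) : List Int :=
  if fromLeft then PySem.List.slice row none (some x)
  else PySem.List.slice row (some (x + 1)) (some (width : Int))

-- [[row[x] > max([-1] + blockers(row, x)) for x in range(width)] for row in grid]
def computeHorizVisibilityMask_alt (grid : List (List Int)) (fromLeft : Bool) : List (List Bool) :=
  let width : Nat := ((PySem.List.pyGet? grid 0).getD []).length
  grid.map (fun row =>
    (PySem.List.pyRange 0 (width : Int) 1).map (fun x =>
      decide ((PySem.List.pyGet? row x).getD 0 >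
        (PySem.List.max? ((-1) :: pvBlockers width fromLeft row x) (fun v => v)).getD 0)))

-- ===== PRECONDITION & SPEC =====
-- Pre_ = exactly the inputs on which A returns: A raises IndexError on an empty grid (grid[0])
-- and on any row shorter than the first row (grid[y][x] for x up to width-1).
def Pre_computeHorizVisibilityMask (grid : List (List Int)) (fromLeft : Bool) : Prop :=
  grid ≠ [] ∧ ∀ row ∈ grid, (grid.headD []).length ≤ row.length
instance (grid : List (List Int)) (fromLeft : Bool) : Decidable (Pre_computeHorizVisibilityMask grid fromLeft) := by unfold Pre_computeHorizVisibilityMask; infer_instance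

def pvWitness_computeHorizVisibilityMask : List (List Int) × Bool := ([[3, 1, 4], [2, 2, 0]], false)

def Spec_computeHorizVisibilityMask (grid : List (List Int)) (fromLeft : Bool) (out : List (List Bool)) : Prop := out = computeHorizVisibilityMask_alt grid fromLeft
instance (grid : List (List Int)) (fromLeft : Bool) (out : List (List Bool)) : Decidable (Spec_computeHorizVisibilityMask grid fromLeft out) := by unfold Spec_computeHorizVisibilityMask; infer_instance

-- ===== CLAIM (what is proved, stated in full; the proofs are below) =====
def Claim_equal_computeHorizVisibilityMask : Prop := ∀ (grid : List (List Int)) (fromLeft : Bool), Dom_computeHorizVisibilityMask grid fromLeft → Pre_computeHorizVisibilityMask grid fromLeft → Spec_computeHorizVisibilityMask grid fromLeft (computeHorizVisibilityMask grid fromLeft)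

-- ===== LEMMAS AND PROOFS =====

-- Reference: visibility of each cell given the running maximum m of the cells already scanned.
def pvRef (m : Int) : List Int → List Bool
  | [] => []
  | c :: cs => decide (c > m) :: pvRef (max m c) cs

-- A's inner loop, ascending scan: processing indices k, k+1, …, k+j-1.
theorem pv_foldA_asc (row : List Int) : ∀ (j k : Nat) (mk : List Bool) (m : Int),
    k + j ≤ row.length → mk.length = k + j →
    (((List.range' k j).map Int.ofNat).foldl
        (fun (st : List Bool × Int) (x : Int) =>
          (st.1.set x.toNat (decide ((PySem.List.pyGet? row x).getD 0 > st.2)),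
            max st.2 ((PySem.List.pyGet? row x).getD 0))) (mk, m)).1
      = mk.take k ++ pvRef m ((row.take (k + j)).drop k) := by
  intro j
  induction j with
  | zero =>
    intro k mk m hle hlen
    simp [List.take_of_length_le (show mk.length ≤ k by omega), pvRef]
  | succ j ih =>
    intro k mk m hle hlen
    have hk : k < row.length := by omega
    have hget : PySem.List.pyGet? row (Int.ofNat k) = some row[k] := by
      simp [List.getElem?_eq_getElem hk]
    have htn : (Int.ofNat k).toNat = k := rfl
    rw [List.range'_succ, List.map_cons, List.foldl_cons]
    simp only [hget, Option.getD_some, htn]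
    have hlen' : (mk.set k (decide (row[k] > m))).length = (k + 1) + j := by simp; omega
    have h := ih (k + 1) (mk.set k (decide (row[k] > m))) (max m row[k]) (by omega) hlen'
    have hidx : k + 1 + j = k + (j + 1) := by omega
    rw [hidx] at h
    rw [h]
    have hkmk : k < mk.length := by omega
    have htake : (mk.set k (decide (row[k] > m))).take (k + 1)
        = mk.take k ++ [decide (row[k] > m)] := by
      rw [List.set_eq_take_append_cons_drop, if_pos hkmk, List.take_append]
      simp [List.length_take, Nat.min_eq_left (le_of_lt hkmk), List.take_of_length_le]
    have hlt : k < (row.take (k + (j + 1))).length := by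
      simp only [List.length_take]; omega
    have hdrop : (row.take (k + (j + 1))).drop k
        = row[k] :: (row.take (k + (j + 1))).drop (k + 1) := by
      rw [List.drop_eq_getElem_cons hlt]
      congr 1
      simp
    rw [htake, hdrop]
    simp [pvRef, List.append_assoc]

-- A's inner loop, descending scan: processing indices j-1, j-2, …, 0.
theorem pv_foldA_desc (row : List Int) : ∀ (j : Nat) (mk : List Bool) (m : Int),
    j ≤ row.length → j ≤ mk.length →
    (((List.range j).reverse.map Int.ofNat).foldl
        (fun (st : List Bool × Int) (x : Int) =>
          (st.1.set x.toNat (decide ((PySem.List.pyGet? row x).getD 0 > st.2)),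
            max st.2 ((PySem.List.pyGet? row x).getD 0))) (mk, m)).1
      = (pvRef m ((row.take j).reverse)).reverse ++ mk.drop j := by
  intro j
  induction j with
  | zero => intro mk m _ _; simp [pvRef]
  | succ j ih =>
    intro mk m hle hmk
    have hj : j < row.length := by omega
    have hget : PySem.List.pyGet? row (Int.ofNat j) = some row[j] := by
      simp [List.getElem?_eq_getElem hj]
    have htn : (Int.ofNat j).toNat = j := rfl
    rw [List.range_succ, List.reverse_append]
    simp only [List.reverse_cons, List.reverse_nil, List.nil_append, List.cons_append,
      List.map_cons, List.foldl_cons, hget, Option.getD_some, htn]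
    have hjmk : j < mk.length := by omega
    have h := ih (mk.set j (decide (row[j] > m))) (max m row[j]) (by omega) (by simp; omega)
    rw [h]
    have hdropset : (mk.set j (decide (row[j] > m))).drop j
        = decide (row[j] > m) :: mk.drop (j + 1) := by
      rw [List.set_eq_take_append_cons_drop, if_pos hjmk, List.drop_append]
      simp [List.length_take, Nat.min_eq_left (le_of_lt hjmk)]
    have htakerev : (row.take (j + 1)).reverse = row[j] :: (row.take j).reverse := by
      rw [List.take_add_one, List.getElem?_eq_getElem hj]
      simp
    rw [hdropset, htakerev]
    simp [pvRef, List.append_assoc]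

-- foldl max pulls a second seed out.
theorem pv_foldl_max_comm (xs : List Int) : ∀ (a b : Int),
    xs.foldl max (max a b) = max (xs.foldl max a) b := by
  induction xs with
  | nil => intro a b; rfl
  | cons c cs ih =>
    intro a b
    simp only [List.foldl_cons]
    rw [show max (max a b) c = max (max a c) b by
      rw [max_assoc, max_assoc, max_comm b c], ih]

-- B's per-cell formula, left-to-right: cell x is visible iff it beats max over the prefix.
theorem pv_refB_asc (l : List Int) : ∀ (m : Int),
    pvRef m l = (List.range l.length).map
      (fun x => decide (l.getD x 0 > (l.take x).foldl max m)) := by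
  induction l with
  | nil => intro m; simp [pvRef]
  | cons c cs ih =>
    intro m
    rw [List.length_cons, List.range_succ_eq_map, List.map_cons, List.map_map]
    simp only [pvRef, List.getD_cons_zero, List.take_zero, List.foldl_nil]
    congr 1
    rw [ih (max m c)]
    apply List.map_congr_left
    intro x _
    simp [List.take_succ_cons]

-- B's per-cell formula, right-to-left: cell x is visible iff it beats max over the suffix.
theorem pv_refB_desc (l : List Int) : ∀ (m : Int),
    (pvRef m l.reverse).reverse = (List.range l.length).map
      (fun x => decide (l.getD x 0 > (l.drop (x + 1)).foldl max m)) := by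
  induction l using List.reverseRecOn with
  | nil => intro m; simp [pvRef]
  | append_singleton init last ih =>
    intro m
    rw [List.reverse_append, List.reverse_cons, List.reverse_nil, List.nil_append,
      List.cons_append, List.nil_append]
    simp only [pvRef, List.reverse_cons]
    rw [ih (max m last)]
    rw [List.length_append, List.length_cons, List.length_nil, List.range_succ,
      List.map_append, List.map_cons, List.map_nil]
    congr 1
    · apply List.map_congr_left
      intro x hx
      have hxlt : x < init.length := List.mem_range.mp hx
      have hget : (init ++ [last]).getD x 0 = init.getD x 0 := by
        simp [List.getD, List.getElem?_append_left hxlt]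
      have hdrop : (init ++ [last]).drop (x + 1) = init.drop (x + 1) ++ [last] := by
        rw [List.drop_append_of_le_length (by omega)]
      rw [hget, hdrop, List.foldl_append, List.foldl_cons, List.foldl_nil,
        max_comm, ← pv_foldl_max_comm, max_comm last m]
    · have hget : (init ++ [last]).getD init.length 0 = last := by
        simp [List.getD]
      have hdrop : (init ++ [last]).drop (init.length + 1) = [] := by
        rw [List.drop_eq_nil_iff]; simp
      rw [hget, hdrop]
      simp

-- python max(xs) on the nonempty list (-1 :: bl) is the running-max fold seeded with -1.
theorem pv_max_cons (bl : List Int) :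
    (PySem.List.max? ((-1) :: bl) (fun v => v)).getD 0 = bl.foldl max (-1) := by
  rw [PySem.List.max?_id_cons]
  rfl

-- ===== VERDICT (by name: the statement is the Claim_ definition above) =====
theorem computeHorizVisibilityMask_spec : Claim_equal_computeHorizVisibilityMask := by
  intro grid fromLeft _ hpre
  obtain ⟨hne, hrows⟩ := hpre
  obtain ⟨g, gs, rfl⟩ := List.exists_cons_of_ne_nil hne
  unfold Spec_computeHorizVisibilityMask computeHorizVisibilityMask computeHorizVisibilityMask_alt
  simp only [PySem.List.pyGet?_zero_cons, Option.getD_some]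
  have hw : ∀ row ∈ g :: gs, g.length ≤ row.length := by
    intro row hrow
    simpa using hrows row hrow
  have hcolsAsc : PySem.List.pyRange 0 (g.length : Int) 1
      = (List.range' 0 g.length).map Int.ofNat := by
    rw [PySem.List.pyRange_one]
    simp [List.range_eq_range']
  cases fromLeft with
  | true =>
    simp only [reduceIte]
    apply List.map_congr_left
    intro row hrow
    have hrl : g.length ≤ row.length := hw row hrow
    rw [hcolsAsc, pv_foldA_asc row g.length 0 (List.replicate g.length false) (-1)
      (by omega) (by simp)]
    simp only [Nat.zero_add, List.take_zero, List.nil_append, List.drop_zero]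
    rw [pv_refB_asc]
    rw [show (row.take g.length).length = g.length from by simp [Nat.min_eq_left hrl]]
    rw [← List.range_eq_range', List.map_map]
    apply List.map_congr_left
    intro k hk
    have hklt : k < g.length := List.mem_range.mp hk
    have hkrow : k < row.length := by omega
    simp only [Function.comp]
    rw [show PySem.List.pyGet? row (Int.ofNat k) = some row[k] from by
      simp [List.getElem?_eq_getElem hkrow]]
    rw [show pvBlockers g.length true row (Int.ofNat k)
        = row.take k from by
      simp [pvBlockers, PySem.List.slice_to_natCast]]
    rw [pv_max_cons]
    simp [List.getD, List.getElem?_take_of_lt hklt, List.getElem?_eq_getElem hkrow,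
      List.take_take, Nat.min_eq_left (le_of_lt hklt)]
  | false =>
    simp only [Bool.false_eq_true, reduceIte]
    apply List.map_congr_left
    intro row hrow
    have hrl : g.length ≤ row.length := hw row hrow
    have hcols : PySem.List.pyRange ((g.length : Int) - 1) (-1) (-1)
        = ((List.range g.length).reverse).map Int.ofNat := by
      rw [PySem.List.pyRange_neg_one_eq_reverse]
      have h0 : (-1 : Int) + 1 = 0 := by norm_num
      have h1 : ((g.length : Int) - 1) + 1 = (g.length : Int) := by ring
      rw [h0, h1, hcolsAsc, ← List.map_reverse, List.range_eq_range']
    rw [hcols, pv_foldA_desc row g.length (List.replicate g.length false) (-1) hrl (by simp)]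
    simp only [List.drop_replicate, Nat.sub_self, List.replicate_zero, List.append_nil]
    rw [pv_refB_desc]
    rw [show (row.take g.length).length = g.length from by simp [Nat.min_eq_left hrl]]
    rw [show PySem.List.pyRange 0 (g.length : Int) 1
        = (List.range g.length).map Int.ofNat from by
      rw [hcolsAsc, List.range_eq_range']]
    rw [List.map_map]
    apply List.map_congr_left
    intro k hk
    have hklt : k < g.length := List.mem_range.mp hk
    have hkrow : k < row.length := by omega
    simp only [Function.comp]
    rw [show PySem.List.pyGet? row (Int.ofNat k) = some row[k] from by
      simp [List.getElem?_eq_getElem hkrow]]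
    rw [show pvBlockers g.length false row (Int.ofNat k)
        = (row.drop (k + 1)).take (g.length - (k + 1)) from by
      simp only [pvBlockers, Bool.false_eq_true, reduceIte]
      rw [show (Int.ofNat k) + 1 = ((k + 1 : Nat) : Int) from by simp,
        PySem.List.slice_natCast]]
    rw [pv_max_cons, List.drop_take]
    simp [List.getD, List.getElem?_take_of_lt hklt, List.getElem?_eq_getElem hkrow]
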